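-- pv_equiv track=rewrite | github.com/Bomiishere/Check_Diff_With_Condition | check_diff.py | valuesFromResults
-- ===== SOURCE A (Python) =====
-- def valuesFromResults(results):
-- 	count = 0
-- 	column0 = '';
-- 	column1 = '';
-- 	for r in results:
-- 		if count == 0:
-- 			column0 = r.replace(' ','')
-- 		if count == 1:
-- 			r = r.replace(' "','')
-- 			r = r.replace('"','')
-- 			column1 = r
-- 		count = count+1
--
-- 	return (column0, column1)
-- ===== SOURCE B (Python) =====
-- def valuesFromResults(results):
-- 	column0 = ''
-- 	column1 = ''
-- 	if len(results) > 0: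
-- 		column0 = results[0].replace(' ', '')
-- 	if len(results) > 1:
-- 		column1 = results[1].replace(' "', '').replace('"', '')
-- 	return (column0, column1)
-- ===== Notes on version B (the rewrite author's own statement) =====
-- stated objective: simpler
-- what changed: Replaces the counting loop over the whole list with direct O(1) indexing of the first two elements guarded by length checks.
import Mathlib
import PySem

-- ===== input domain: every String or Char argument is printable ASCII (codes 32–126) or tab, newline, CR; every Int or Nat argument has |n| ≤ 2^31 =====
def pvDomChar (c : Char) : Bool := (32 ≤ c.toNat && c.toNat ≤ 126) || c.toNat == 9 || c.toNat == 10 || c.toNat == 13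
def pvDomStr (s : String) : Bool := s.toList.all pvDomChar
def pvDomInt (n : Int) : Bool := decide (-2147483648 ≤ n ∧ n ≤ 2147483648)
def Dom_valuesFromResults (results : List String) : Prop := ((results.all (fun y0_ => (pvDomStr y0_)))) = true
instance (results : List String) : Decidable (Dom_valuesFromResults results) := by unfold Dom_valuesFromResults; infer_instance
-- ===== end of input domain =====

-- B replaces A's counting loop over the whole list by direct guarded access to the first two elements (simpler, no full scan); same return value.

-- ===== PORT A =====
-- one loop step of A: count selects which column to update
def vfrStep (acc : Int × String × String) (r : String) : Int × String × String :=
  let column0 := if acc.1 = 0 then PySem.Str.replace r " " "" else acc.2.1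
  let column1 := if acc.1 = 1 then PySem.Str.replace (PySem.Str.replace r " \"" "") "\"" "" else acc.2.2
  (acc.1 + 1, column0, column1)

def valuesFromResults (results : List String) : String × String :=
  let fin := results.foldl vfrStep (0, "", "")
  (fin.2.1, fin.2.2)

-- ===== PORT B =====
def valuesFromResults_alt (results : List String) : String × String :=
  let column0 : String := if 0 < results.length then PySem.Str.replace (results.getD 0 "") " " "" else ""
  let column1 : String := if 1 < results.length then PySem.Str.replace (PySem.Str.replace (results.getD 1 "") " \"" "") "\"" "" else ""
  (column0, column1)

-- ===== PRECONDITION & SPEC =====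
def Spec_valuesFromResults (results : List String) (out : String × String) : Prop := out = valuesFromResults_alt results
instance (results : List String) (out : String × String) : Decidable (Spec_valuesFromResults results out) := by unfold Spec_valuesFromResults; infer_instance

-- ===== CLAIM (what is proved, stated in full; the proofs are below) =====
def Claim_equal_valuesFromResults : Prop := ∀ (results : List String), Dom_valuesFromResults results → Spec_valuesFromResults results (valuesFromResults results)

-- ===== LEMMAS AND PROOFS =====
-- once the counter has passed 1, A's loop never changes the columns
theorem vfr_foldl_const (rest : List String) (n : Int) (p : String × String) (h : 2 ≤ n) :
    (List.foldl vfrStep (n, p) rest).2 = p := by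
  induction rest generalizing n p with
  | nil => rfl
  | cons r rs ih =>
      simp only [List.foldl, vfrStep]
      rw [if_neg (by omega), if_neg (by omega)]
      exact ih (n + 1) p (by omega)

-- ===== VERDICT (by name: the statement is the Claim_ definition above) =====
theorem valuesFromResults_spec : Claim_equal_valuesFromResults := by
  intro results _
  unfold Spec_valuesFromResults valuesFromResults valuesFromResults_alt
  match results with
  | [] => rfl
  | [a] => simp [vfrStep]
  | a :: b :: rest =>
      simp only [List.foldl, vfrStep]
      norm_num [vfr_foldl_const rest 2 _ (by omega)]
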